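-- pv_equiv track=rewrite | github.com/DanLeonardo/A-December-of-Algorithms-2019 | December-01/python3_DanLeonardo.py | nish_number
-- ===== SOURCE A (Python) =====
-- def nish_number(num, base):
--     if num < 1 or base < 0:
--         return -1
--
--     binary_array = create_binary_array(num)
--
--     sum = 0
--     for i, power in enumerate(binary_array):
--         if power is 1:
--             sum += pow(base, i)
--
--     return sum
--
-- def create_binary_array(num):
--     binary_array = []
--
--     binary_array.append(num%2)
--     if num > 1:
--         binary_array.extend(create_binary_array(num//2))
--
--     return binary_array
-- ===== SOURCE B (Python) =====
-- def nish_number(num, base):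
--     if num < 1 or base < 0:
--         return -1
--     total = 0
--     i = 0
--     while num > 0:
--         if num % 2 == 1:
--             total += pow(base, i)
--         i += 1
--         num //= 2
--     return total
-- ===== Notes on version B (the rewrite author's own statement) =====
-- stated objective: simpler
-- what changed: Replaced the recursive create_binary_array helper and the subsequent enumerate scan of the intermediate digit list by one iterative loop that extracts bits from num directly while accumulating base^i.
import Mathlib
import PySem

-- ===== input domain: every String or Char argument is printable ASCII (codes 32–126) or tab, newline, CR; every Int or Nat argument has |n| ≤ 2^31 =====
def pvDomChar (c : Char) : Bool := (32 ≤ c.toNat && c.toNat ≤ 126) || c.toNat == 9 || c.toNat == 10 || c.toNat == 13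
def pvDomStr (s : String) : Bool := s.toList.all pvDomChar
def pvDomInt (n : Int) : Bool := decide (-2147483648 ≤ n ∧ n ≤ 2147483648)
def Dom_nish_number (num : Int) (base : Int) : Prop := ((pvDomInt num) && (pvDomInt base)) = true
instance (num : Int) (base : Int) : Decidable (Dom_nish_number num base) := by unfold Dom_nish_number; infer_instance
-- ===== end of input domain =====

-- B replaces A's recursive digit-list construction plus enumerate scan by one direct bit-extraction loop; objective: simpler.

-- ===== PORT A =====
-- termination fact for create_binary_array, cited in decreasing_by
theorem pvHalfLt (num : Int) (h : 0 < num) :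
    (PySem.Int.floordiv num 2).toNat < num.toNat := by
  rw [PySem.Int.floordiv_eq_ediv_of_pos (by omega : (0:Int) < 2)]
  omega

def create_binary_array (num : Int) : List Int :=
  -- append num%2, then (if num > 1) extend with the recursive call
  PySem.Int.mod num 2 ::
    (if h : 1 < num then create_binary_array (PySem.Int.floordiv num 2) else [])
termination_by num.toNat
decreasing_by exact pvHalfLt num (by omega)

def nish_number (num : Int) (base : Int) : Int :=
  if num < 1 ∨ base < 0 then -1
  else
    -- for i, power in enumerate(binary_array): if power is 1: sum += pow(base, i)
    ((create_binary_array num).foldl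
      (fun (p : Int × Nat) power =>
        (if power = 1 then p.1 + base ^ p.2 else p.1, p.2 + 1))
      (0, 0)).1

-- ===== PORT B =====
def nishLoop (base : Int) (num : Int) (i : Nat) (total : Int) : Int :=
  if h : 0 < num then
    nishLoop base (PySem.Int.floordiv num 2) (i + 1)
      (if PySem.Int.mod num 2 = 1 then total + base ^ i else total)
  else total
termination_by num.toNat
decreasing_by exact pvHalfLt num h

def nish_number_alt (num : Int) (base : Int) : Int :=
  if num < 1 ∨ base < 0 then -1
  else nishLoop base num 0 0

-- ===== PRECONDITION & SPEC =====
def Spec_nish_number (num : Int) (base : Int) (out : Int) : Prop := out = nish_number_alt num base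
instance (num : Int) (base : Int) (out : Int) : Decidable (Spec_nish_number num base out) := by unfold Spec_nish_number; infer_instance

-- ===== CLAIM (what is proved, stated in full; the proofs are below) =====
def Claim_equal_nish_number : Prop := ∀ (num : Int) (base : Int), Dom_nish_number num base → Spec_nish_number num base (nish_number num base)

-- ===== LEMMAS AND PROOFS =====

theorem fold_eq_loop (base : Int) :
    ∀ (n : Nat) (num : Int), num.toNat = n → 1 ≤ num → ∀ (i : Nat) (s : Int),
    ((create_binary_array num).foldl
      (fun (p : Int × Nat) power =>
        (if power = 1 then p.1 + base ^ p.2 else p.1, p.2 + 1))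
      (s, i)).1 = nishLoop base num i s := by
  intro n
  induction n using Nat.strong_induction_on with
  | _ n ih =>
    intro num hn h1 i s
    rw [create_binary_array, nishLoop]
    by_cases h2 : 1 < num
    · have hdiv : PySem.Int.floordiv num 2 = num / 2 :=
        PySem.Int.floordiv_eq_ediv_of_pos (by omega)
      have hrec : 1 ≤ PySem.Int.floordiv num 2 := by rw [hdiv]; omega
      have hlt : (PySem.Int.floordiv num 2).toNat < n := hn ▸ pvHalfLt num (by omega)
      simp only [dif_pos h2, List.foldl_cons]
      rw [ih _ hlt _ rfl hrec, dif_pos (show (0:Int) < num by omega)]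
    · have hone : num = 1 := by omega
      subst hone
      have hm : PySem.Int.mod 1 2 = 1 := by decide
      have hf : PySem.Int.floordiv 1 2 = 0 := by decide
      rw [dif_neg (show ¬(1:Int) < 1 by norm_num), dif_pos (show (0:Int) < 1 by norm_num),
        hm, hf, nishLoop, dif_neg (show ¬(0:Int) < 0 by norm_num)]
      simp
  
theorem nish_number_spec : Claim_equal_nish_number := by
  unfold Claim_equal_nish_number Spec_nish_number
  intro num base _
  unfold nish_number nish_number_alt
  by_cases hg : num < 1 ∨ base < 0
  · simp [hg]
  · simp only [if_neg hg]
    exact fold_eq_loop base num.toNat num rfl (by omega) 0 0
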